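-- pv_equiv track=rewrite | github.com/DataQualityCommittee/dqc_us_rules | xule/XuleValue.py | _reduce_number
-- ===== SOURCE A (Python) =====
-- def _reduce_number(num):
--     if '.' in num:
--         j = 0
--         #for i in range(1,4):
--         i = 1
--         while True:
--             if num[-i] == '.':
--                 break
--             elif num[-i] == '0':
--                 j = i
--             else:
--                 break
--             i += 1
--         if j != 0:
--             num = num[:-j]
--         if num[-1] == '.':
--             num = num[:-1]
--         return num
--     else:
--         return num
-- ===== SOURCE B (Python) =====
-- def _reduce_number(num):
--     if '.' not in num:
--         return num
--     # single forward pass: buffer runs of '0'; a run is flushed only when a later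
--     # character follows it, so a trailing zero-run is never emitted
--     out = []
--     zeros = 0
--     for ch in num:
--         if ch == '0':
--             zeros += 1
--         else:
--             out.extend('0' * zeros)
--             zeros = 0
--             out.append(ch)
--     if out and out[-1] == '.':
--         out.pop()
--     return ''.join(out)
-- ===== Notes on version B (the rewrite author's own statement) =====
-- stated objective: alternative
-- what changed: Replaces A's backward index scan with counters and conditional slicing by a single forward pass that buffers runs of '0' and flushes a run only when a later character follows it, so trailing zeros are never emitted; a final trailing '.' is popped.
import Mathlib
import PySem

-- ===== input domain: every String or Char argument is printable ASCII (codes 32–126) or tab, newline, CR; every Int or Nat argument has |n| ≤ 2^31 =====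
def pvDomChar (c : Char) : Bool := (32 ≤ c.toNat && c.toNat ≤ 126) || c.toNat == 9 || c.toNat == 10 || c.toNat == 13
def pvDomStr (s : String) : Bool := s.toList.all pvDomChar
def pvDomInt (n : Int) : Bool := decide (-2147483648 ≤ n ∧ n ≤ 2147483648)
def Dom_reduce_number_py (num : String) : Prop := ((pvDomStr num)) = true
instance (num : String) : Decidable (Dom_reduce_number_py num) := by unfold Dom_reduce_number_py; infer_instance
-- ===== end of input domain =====

-- B replaces A's backward index scan and conditional slicings by a single forward pass that
-- buffers '0'-runs and flushes a run only when a later character follows it (alternative).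

-- ===== PORT A =====
-- The while loop: i counts positions from the end (num[-i]), j remembers the last position that
-- held a '0'; walking the reversed character list visits exactly num[-1], num[-2], … in order.
-- (Python would raise IndexError if i ran past the length; under the '.'-guard the loop always
-- breaks first, so the [] case below — returning j like a break — is never reached.)
def reduceLoopA : List Char → Nat → Nat → Nat
  | [], _, j => j
  | c :: rest, i, j =>
    if c = '.' then j
    else if c = '0' then reduceLoopA rest (i + 1) i
    else j

def reduce_number_py (num : String) : String :=
  if PySem.Str.isIn "." num then
    let j := reduceLoopA num.toList.reverse 1 0
    let num1 := if j ≠ 0 then PySem.List.slice num.toList none (some (-(j : Int))) else num.toList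
    if PySem.List.pyGet? num1 (-1) = some '.' then String.ofList (PySem.List.slice num1 none (some (-1)))
    else String.ofList num1
  else num

-- ===== PORT B =====
-- the for-loop: state (out, zeros); '0' increments the buffer, any other character flushes the
-- buffered zeros followed by itself.
def reduceLoopB : List Char → List Char → Nat → List Char × Nat
  | [], out, zeros => (out, zeros)
  | c :: rest, out, zeros =>
    if c = '0' then reduceLoopB rest out (zeros + 1)
    else reduceLoopB rest (out ++ List.replicate zeros '0' ++ [c]) 0

def reduce_number_py_alt (num : String) : String :=
  if PySem.Str.isIn "." num then
    let out := (reduceLoopB num.toList [] 0).1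
    -- 'if out and out[-1] == '.'': pyGet? returns none on [], so the one test covers both conjuncts
    let out := if PySem.List.pyGet? out (-1) = some '.' then out.dropLast else out
    String.ofList out
  else num

-- ===== PRECONDITION & SPEC =====
def Spec_reduce_number_py (num : String) (out : String) : Prop := out = reduce_number_py_alt num
instance (num : String) (out : String) : Decidable (Spec_reduce_number_py num out) := by unfold Spec_reduce_number_py; infer_instance

-- ===== CLAIM (what is proved, stated in full; the proofs are below) =====
def Claim_equal_reduce_number_py : Prop := ∀ (num : String), Dom_reduce_number_py num → Spec_reduce_number_py num (reduce_number_py num)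

-- ===== LEMMAS AND PROOFS =====

-- Both ports, under the dot-guard, reduce to this normal form of the reversed character list:
-- drop the leading (= trailing in the string) '0'-run, then drop one leading '.' if present.
def coreReduce (r : List Char) : List Char :=
  let d := r.dropWhile (· = '0')
  if d.head? = some '.' then d.tail.reverse else d.reverse

-- A's while loop counts the trailing run of '0's (stopping at '.' or any other character).
theorem reduceLoopA_eq (r : List Char) (i : Nat) :
    reduceLoopA r (i + 1) i = i + (r.takeWhile (· = '0')).length := by
  induction r generalizing i with
  | nil => simp [reduceLoopA]
  | cons c rest ih =>
    by_cases hdot : c = '.'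
    · simp [reduceLoopA, hdot, List.takeWhile]
    · by_cases h0 : c = '0'
      · simp [reduceLoopA, h0, List.takeWhile, ih (i + 1)]
        omega
      · simp [reduceLoopA, hdot, h0, List.takeWhile]

theorem drop_takeWhile_length (p : Char → Bool) (r : List Char) :
    r.drop ((r.takeWhile p).length) = r.dropWhile p := by
  have ht := List.takeWhile_append_dropWhile (p := p) (l := r)
  calc r.drop ((r.takeWhile p).length)
      = (r.takeWhile p ++ r.dropWhile p).drop ((r.takeWhile p).length) := by rw [ht]
    _ = r.dropWhile p := List.drop_left

theorem dropWhile_ne_nil_of_mem_not {p : Char → Bool} {r : List Char} {c : Char}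
    (hc : c ∈ r) (hp : p c = false) : r.dropWhile p ≠ [] := by
  simp only [ne_eq, List.dropWhile_eq_nil_iff]
  intro hall; have := hall c hc; rw [hp] at this; exact absurd this (by simp)

-- "strip trailing zeros" as a function of the list read forwards
def rstrip0 (l : List Char) : List Char := (l.reverse.dropWhile (· = '0')).reverse

theorem rstrip0_replicate (z : Nat) : rstrip0 (List.replicate z '0') = [] := by
  simp [rstrip0]

theorem rstrip0_append_cons (l rest : List Char) (c : Char) (hc : ¬ c = '0') :
    rstrip0 (l ++ c :: rest) = l ++ c :: rstrip0 rest := by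
  unfold rstrip0
  rw [List.reverse_append, List.reverse_cons, List.append_assoc, List.singleton_append,
    List.dropWhile_append]
  by_cases hz : rest.reverse.dropWhile (· = '0') = []
  · simp [hz, List.dropWhile, hc]
  · simp [hz]

-- invariant of B's loop: the flushed output is 'out' plus everything of cs except its trailing zeros
theorem reduceLoopB_eq (cs out : List Char) (z : Nat) :
    (reduceLoopB cs out z).1 = out ++ rstrip0 (List.replicate z '0' ++ cs) := by
  induction cs generalizing out z with
  | nil => simp [reduceLoopB, rstrip0_replicate]
  | cons c rest ih =>
    by_cases h0 : c = '0'
    · have hrep : List.replicate z '0' ++ '0' :: rest = List.replicate (z + 1) '0' ++ rest := by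
        rw [List.replicate_succ', List.append_assoc, List.singleton_append]
      rw [reduceLoopB, if_pos h0, ih, h0, hrep]
    · rw [reduceLoopB, if_neg h0, ih, rstrip0_append_cons _ _ _ h0]
      simp

-- A's port, under the guard, computes coreReduce of the reversed list.
theorem portA_char (num : String) (h : '.' ∈ num.toList) :
    reduce_number_py num =
      if PySem.Str.isIn "." num then String.ofList (coreReduce num.toList.reverse)
      else num := by
  unfold reduce_number_py
  split
  case isFalse => rfl
  case isTrue hin =>
  dsimp only
  have hj : reduceLoopA num.toList.reverse 1 0 =
      (num.toList.reverse.takeWhile (· = '0')).length := by simpa using reduceLoopA_eq num.toList.reverse 0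
  have hmemr : '.' ∈ num.toList.reverse := by simpa using h
  have hd : num.toList.reverse.dropWhile (· = '0') ≠ [] :=
    dropWhile_ne_nil_of_mem_not hmemr (by simp)
  obtain ⟨c, d', hcd⟩ := List.exists_cons_of_ne_nil hd
  have hnum1 : (if reduceLoopA num.toList.reverse 1 0 ≠ 0 then
        PySem.List.slice num.toList none (some (-(reduceLoopA num.toList.reverse 1 0 : Int)))
      else num.toList) = (num.toList.reverse.dropWhile (· = '0')).reverse := by
    rw [hj]
    by_cases h0 : (num.toList.reverse.takeWhile (· = '0')).length = 0
    · have : num.toList.reverse.dropWhile (· = '0') = num.toList.reverse := by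
        have := drop_takeWhile_length (· = '0') num.toList.reverse
        rw [h0] at this; simpa using this.symm
      simp [h0, this]
    · rw [if_pos h0, PySem.List.slice_to_neg_natCast _ _ (by omega),
          ← drop_takeWhile_length (· = '0') num.toList.reverse, List.reverse_drop]
      simp
  rw [hnum1, hcd]
  simp only [List.reverse_cons, coreReduce, hcd]
  have hget : PySem.List.pyGet? (d'.reverse ++ [c]) (-1) = some c := by
    simp [PySem.List.pyGet?, PySem.List.pyIdx?]
  rw [hget]
  by_cases hc : c = '.'
  · rw [if_pos (by rw [hc]), if_pos (by simp [hc]), PySem.List.slice_to_neg_one]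
    simp
  · rw [if_neg (by simpa using hc), if_neg (by simpa using hc)]

-- B's port, under the guard, computes the same normal form.
theorem portB_char (num : String) (h : '.' ∈ num.toList) :
    reduce_number_py_alt num =
      if PySem.Str.isIn "." num then String.ofList (coreReduce num.toList.reverse)
      else num := by
  unfold reduce_number_py_alt
  split
  case isFalse => rfl
  case isTrue hin =>
  dsimp only
  have hout : (reduceLoopB num.toList [] 0).1 = (num.toList.reverse.dropWhile (· = '0')).reverse := by
    rw [reduceLoopB_eq]; simp [rstrip0]
  rw [hout]
  have hmemr : '.' ∈ num.toList.reverse := by simpa using h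
  have hd : num.toList.reverse.dropWhile (· = '0') ≠ [] :=
    dropWhile_ne_nil_of_mem_not hmemr (by simp)
  obtain ⟨c, d', hcd⟩ := List.exists_cons_of_ne_nil hd
  rw [hcd]
  simp only [List.reverse_cons, coreReduce, hcd]
  have hget : PySem.List.pyGet? (d'.reverse ++ [c]) (-1) = some c := by
    simp [PySem.List.pyGet?, PySem.List.pyIdx?]
  rw [hget]
  by_cases hc : c = '.'
  · rw [if_pos (by rw [hc]), if_pos (by simp [hc])]
    simp
  · rw [if_neg (by simpa using hc), if_neg (by simpa using hc)]

theorem main_eq (num : String) : reduce_number_py num = reduce_number_py_alt num := by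
  by_cases h : PySem.Str.isIn "." num
  · have hmem : '.' ∈ num.toList := by
      have := (PySem.Str.isIn_iff_infix (sub := ".") (s := num)).mp h
      exact this.subset (by simp)
    rw [portA_char num hmem, portB_char num hmem]
  · unfold reduce_number_py reduce_number_py_alt
    rw [if_neg h, if_neg h]

-- ===== VERDICT (by name: the statement is the Claim_ definition above) =====
theorem reduce_number_py_spec : Claim_equal_reduce_number_py := by
  intro num _
  unfold Spec_reduce_number_py
  exact main_eq num
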